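-- pv_equiv track=rewrite | github.com/lucastheo/manchetes-data | libs/ngrama/lib_data_base_ngrama.py | NGRAMA_FATHER
-- ===== SOURCE A (Python) =====
-- def NGRAMA_FATHER( word , grama ):
--     s = ""
--     cout = 0
--     for e in word:
--         s += f"{e}"
--         if cout % 5 ==4:
--             s += "/"
--             cout = -1
--         cout += 1
--     if s.endswith("/") == False:
--         s += "/"
--     return f"../data/data_bases/ngrama/gramas_order/{grama}/{s}"
-- ===== SOURCE B (Python) =====
-- def NGRAMA_FATHER(word, grama):
--     chunks = []
--     rest = word
--     while rest:
--         chunks.append(rest[:5])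
--         rest = rest[5:]
--     s = "".join(c + "/" if len(c) == 5 else c for c in chunks)
--     if not s.endswith("/"):
--         s += "/"
--     return f"../data/data_bases/ngrama/gramas_order/{grama}/{s}"
-- ===== Notes on version B (the rewrite author's own statement) =====
-- stated objective: simpler
-- what changed: Replaces the per-character accumulation with a modulo counter and reset by slicing the word into 5-character chunks, terminating every full chunk with '/', joining, and applying the same trailing-slash check.
import Mathlib
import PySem

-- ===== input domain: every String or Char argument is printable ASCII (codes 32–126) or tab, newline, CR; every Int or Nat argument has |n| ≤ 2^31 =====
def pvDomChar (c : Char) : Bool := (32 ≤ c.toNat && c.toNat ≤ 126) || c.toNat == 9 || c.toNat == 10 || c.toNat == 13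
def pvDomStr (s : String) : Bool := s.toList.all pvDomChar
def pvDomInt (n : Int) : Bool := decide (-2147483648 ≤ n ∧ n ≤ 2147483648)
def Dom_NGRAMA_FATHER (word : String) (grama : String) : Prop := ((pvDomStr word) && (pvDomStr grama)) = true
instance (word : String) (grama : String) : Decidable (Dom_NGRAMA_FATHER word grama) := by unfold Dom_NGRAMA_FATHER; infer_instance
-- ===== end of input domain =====

-- B replaces A's per-character loop with a modulo counter by chunk-into-5, terminate full chunks
-- with '/', join, then the same trailing-slash check ('simpler'); same return value everywhere.

-- ===== PORT A =====
-- the for-loop of A: state (s, cout), one step per character of word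
def pvLoopA : List Char → List Char → Int → List Char
  | [], s, _ => s
  | e :: rest, s, cout =>
      if PySem.Int.mod cout 5 == 4 then
        pvLoopA rest (s ++ [e] ++ ['/']) (-1 + 1)
      else
        pvLoopA rest (s ++ [e]) (cout + 1)

def NGRAMA_FATHER (word : String) (grama : String) : String :=
  let s := pvLoopA word.toList [] 0
  let s := if (PySem.Chars.endswith s ['/'] == false) then s ++ ['/'] else s
  String.ofList (("../data/data_bases/ngrama/gramas_order/").toList ++ grama.toList ++ ['/'] ++ s)

-- ===== PORT B =====
-- the while-loop of Source B: peel rest[:5] off rest until rest is empty (fuel = length makes it structural)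
def pvChunksGo : Nat → List Char → List (List Char)
  | _, [] => []
  | 0, _ :: _ => []        -- never reached: fuel starts at the length
  | fuel + 1, a :: l => ((a :: l).take 5) :: pvChunksGo fuel ((a :: l).drop 5)

def pvChunksB (l : List Char) : List (List Char) := pvChunksGo l.length l

def NGRAMA_FATHER_alt (word : String) (grama : String) : String :=
  let s := ((pvChunksB word.toList).map (fun c => if c.length == 5 then c ++ ['/'] else c)).flatten
  let s := if (PySem.Chars.endswith s ['/'] == false) then s ++ ['/'] else s
  String.ofList (("../data/data_bases/ngrama/gramas_order/").toList ++ grama.toList ++ ['/'] ++ s)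

-- ===== PRECONDITION & SPEC =====
def Spec_NGRAMA_FATHER (word : String) (grama : String) (out : String) : Prop := out = NGRAMA_FATHER_alt word grama
instance (word : String) (grama : String) (out : String) : Decidable (Spec_NGRAMA_FATHER word grama out) := by unfold Spec_NGRAMA_FATHER; infer_instance

-- ===== CLAIM (what is proved, stated in full; the proofs are below) =====
def Claim_equal_NGRAMA_FATHER : Prop := ∀ (word : String) (grama : String), Dom_NGRAMA_FATHER word grama → Spec_NGRAMA_FATHER word grama (NGRAMA_FATHER word grama)

-- ===== LEMMAS AND PROOFS =====

lemma pvChunksGo_fuel : ∀ n m (l : List Char), l.length ≤ n → l.length ≤ m →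
    pvChunksGo n l = pvChunksGo m l := by
  intro n
  induction n with
  | zero =>
    intro m l hn _; cases l with
    | nil => cases m <;> rfl
    | cons a l => simp at hn
  | succ n ih =>
    intro m l hn hm
    cases l with
    | nil => cases m <;> rfl
    | cons a l =>
      cases m with
      | zero => simp at hm
      | succ m =>
        simp only [pvChunksGo]
        congr 1
        apply ih
        · simp only [List.length_drop, List.length_cons] at hn ⊢; omega
        · simp only [List.length_drop, List.length_cons] at hm ⊢; omega

lemma pvChunksB_cons (a : Char) (l : List Char) :
    pvChunksB (a :: l) = ((a :: l).take 5) :: pvChunksB ((a :: l).drop 5) := by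
  show pvChunksGo (l.length + 1) (a :: l) = _
  simp only [pvChunksGo]
  congr 1
  apply pvChunksGo_fuel
  · simp only [List.length_drop, List.length_cons]; omega
  · rfl

lemma pvChunksB_ne_nil (a : Char) (l : List Char) : pvChunksB (a :: l) ≠ [] := by
  rw [pvChunksB_cons]; simp

-- the loop of A equals join-of-chunks, plus a trailing '/' exactly when the length is a positive multiple of 5
lemma pvLoopA_step5 (a b c d e : Char) (rest s : List Char) :
    pvLoopA (a :: b :: c :: d :: e :: rest) s 0 = pvLoopA rest (s ++ [a, b, c, d, e, '/']) 0 := by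
  have h0 : (PySem.Int.mod 0 5 == 4) = false := rfl
  have h1 : (PySem.Int.mod 1 5 == 4) = false := rfl
  have h2 : (PySem.Int.mod 2 5 == 4) = false := rfl
  have h3 : (PySem.Int.mod 3 5 == 4) = false := rfl
  have h4 : (PySem.Int.mod 4 5 == 4) = true := rfl
  norm_num [pvLoopA, h0, h1, h2, h3, h4]

lemma pvLoopA_short (l s : List Char) (h : l.length < 5) : pvLoopA l s 0 = s ++ l := by
  rcases l with _ | ⟨a, _ | ⟨b, _ | ⟨c, _ | ⟨d, _ | ⟨e, t⟩⟩⟩⟩⟩ <;>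
    simp_all [pvLoopA]; omega

lemma pvLoopA_chunks : ∀ n (l s : List Char), l.length ≤ n →
    pvLoopA l s 0 = s ++ PySem.Chars.join ['/'] (pvChunksB l) ++
      (if l ≠ [] ∧ l.length % 5 = 0 then ['/'] else []) := by
  intro n
  induction n with
  | zero =>
    intro l s hl
    have : l = [] := by cases l; rfl; simp at hl
    subst this; simp [pvLoopA, pvChunksB, pvChunksGo, PySem.Chars.join_nil]
  | succ n ih =>
    intro l s hl
    by_cases hlen : l.length < 5
    · rw [pvLoopA_short l s hlen]
      cases l with
      | nil => simp [pvChunksB, pvChunksGo, PySem.Chars.join_nil]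
      | cons a t =>
        rw [pvChunksB_cons]
        have htk : (a :: t).take 5 = a :: t := List.take_of_length_le (by omega)
        have hdr : (a :: t).drop 5 = [] := List.drop_eq_nil_of_le (by omega)
        rw [htk, hdr]
        have : pvChunksB ([] : List Char) = [] := rfl
        rw [this, PySem.Chars.join_singleton]
        have hnot : ¬ (t.length + 1) % 5 = 0 := by
          simp only [List.length_cons] at hlen; omega
        simp [hnot]
    · -- at least 5 characters: peel one chunk
      rcases l with _ | ⟨a, _ | ⟨b, _ | ⟨c, _ | ⟨d, _ | ⟨e, rest⟩⟩⟩⟩⟩ <;> simp at hlen <;> try omega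
      rw [pvLoopA_step5]
      have hrlen : rest.length ≤ n := by simp at hl; omega
      rw [ih rest (s ++ [a, b, c, d, e, '/']) hrlen]
      rw [pvChunksB_cons]
      have htk : (a :: b :: c :: d :: e :: rest).take 5 = [a, b, c, d, e] := rfl
      have hdr : (a :: b :: c :: d :: e :: rest).drop 5 = rest := rfl
      rw [htk, hdr]
      cases rest with
      | nil =>
        have : pvChunksB ([] : List Char) = [] := rfl
        rw [this, PySem.Chars.join_singleton]
        simp
      | cons b' rest' =>
        rcases hck : pvChunksB (b' :: rest') with _ | ⟨c', cks⟩
        · exact absurd hck (pvChunksB_ne_nil b' rest')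
        rw [PySem.Chars.join_cons_cons]
        have hmod : ((rest'.length + 1) % 5 = 0) ↔
            ((rest'.length + 1 + 1 + 1 + 1 + 1 + 1) % 5 = 0) := by omega
        by_cases h5 : (rest'.length + 1) % 5 = 0
        · simp [h5, hmod.mp h5, List.append_assoc]
        · have h6 : ¬ (rest'.length + 1 + 1 + 1 + 1 + 1 + 1) % 5 = 0 := fun h => h5 (hmod.mpr h)
          simp [h5, h6, List.append_assoc]

-- B's joined string equals A's loop output: full chunks carry a '/' exactly like A's counter does
lemma pvFlat : ∀ n (l : List Char), l.length ≤ n →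
    ((pvChunksB l).map (fun c => if c.length == 5 then c ++ ['/'] else c)).flatten
      = PySem.Chars.join ['/'] (pvChunksB l) ++
        (if l ≠ [] ∧ l.length % 5 = 0 then ['/'] else []) := by
  intro n
  induction n with
  | zero =>
    intro l hl
    have : l = [] := by cases l; rfl; simp at hl
    subst this; simp [pvChunksB, pvChunksGo, PySem.Chars.join_nil]
  | succ n ih =>
    intro l hl
    by_cases hlen : l.length < 5
    · cases l with
      | nil => simp [pvChunksB, pvChunksGo, PySem.Chars.join_nil]
      | cons a t =>
        rw [pvChunksB_cons]
        have htk : (a :: t).take 5 = a :: t := List.take_of_length_le (by omega)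
        have hdr : (a :: t).drop 5 = [] := List.drop_eq_nil_of_le (by omega)
        rw [htk, hdr]
        have hnil : pvChunksB ([] : List Char) = [] := rfl
        rw [hnil, PySem.Chars.join_singleton]
        have h5 : ((a :: t).length == 5) = false := by
          simp only [List.length_cons] at hlen ⊢
          simp; omega
        have hnot : ¬ (t.length + 1) % 5 = 0 := by
          simp only [List.length_cons] at hlen; omega
        simp only [List.length_cons] at hlen
        simp [h5, hnot]
        omega
    · rcases l with _ | ⟨a, _ | ⟨b, _ | ⟨c, _ | ⟨d, _ | ⟨e, rest⟩⟩⟩⟩⟩ <;> simp at hlen <;> try omega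
      rw [pvChunksB_cons]
      have htk : (a :: b :: c :: d :: e :: rest).take 5 = [a, b, c, d, e] := rfl
      have hdr : (a :: b :: c :: d :: e :: rest).drop 5 = rest := rfl
      rw [htk, hdr]
      have hrlen : rest.length ≤ n := by simp at hl; omega
      have hIH := ih rest hrlen
      cases rest with
      | nil =>
        have hnil : pvChunksB ([] : List Char) = [] := rfl
        rw [hnil, PySem.Chars.join_singleton]
        simp
      | cons b' rest' =>
        rcases hck : pvChunksB (b' :: rest') with _ | ⟨c', cks⟩
        · exact absurd hck (pvChunksB_ne_nil b' rest')
        rw [PySem.Chars.join_cons_cons]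
        rw [hck] at hIH
        simp only [List.map_cons, List.flatten_cons] at hIH ⊢
        have hfull : (([a, b, c, d, e] : List Char).length == 5) = true := rfl
        rw [hfull]
        simp only [if_pos rfl, reduceIte]
        rw [hIH]
        have hmod : ((rest'.length + 1) % 5 = 0) ↔
            ((rest'.length + 1 + 1 + 1 + 1 + 1 + 1) % 5 = 0) := by omega
        by_cases h5 : (rest'.length + 1) % 5 = 0
        · simp [h5, hmod.mp h5, List.append_assoc]
        · have h6 : ¬ (rest'.length + 1 + 1 + 1 + 1 + 1 + 1) % 5 = 0 := fun h => h5 (hmod.mpr h)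
          simp [h5, h6, List.append_assoc]

-- ===== VERDICT (by name: the statement is the Claim_ definition above) =====
theorem NGRAMA_FATHER_spec : Claim_equal_NGRAMA_FATHER := by
  intro word grama _
  unfold Spec_NGRAMA_FATHER NGRAMA_FATHER NGRAMA_FATHER_alt
  rw [pvLoopA_chunks word.toList.length word.toList [] le_rfl,
      pvFlat word.toList.length word.toList le_rfl]
  simp
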